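-- pv_equiv track=rewrite | github.com/keeb/media-management-service | mediaservice/parse.py | parse_movie
-- ===== SOURCE A (Python) =====
-- def is_resolution(part: str) -> bool:
--     """Check if string contains resolution marker."""
--     resolutions = ["1080p", "720p", "480p", "2160p", "4k", "uhd"]
--     # Remove brackets if present
--     clean_part = part.strip("[]()").lower()
--     return any(res.lower() in clean_part for res in resolutions)
--
-- def is_year(part: str) -> bool:
--     """Check if string contains a year between 1900-2099."""
--     try:
--         # Remove brackets/parens and extract digits
--         clean_part = part.strip("[]()").lower()
--         year = int(''.join(c for c in clean_part if c.isdigit())[:4])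
--         return 1900 <= year <= 2099
--     except:
--         return False
--
-- def is_encoding(part: str) -> bool:
--     """Check if string contains encoding information."""
--     encodings = ["h264", "x264", "x265", "h265", "aac2", "xvid"]
--     return any(encoding in part.lower() for encoding in encodings)
--
-- def parse_movie(filename: str) -> dict:
--     """Parse movie filename into components."""
--     movie_info = {
--         "name": "",
--         "year": None,
--         "resolution": None,
--         "encoding": None,
--         "release_team": None
--     }
--
--     parts = filename.replace('.', ' ').split(' ')
--     name_parts = []
--     found_year = False
--
--     for part in parts:
--         if not found_year:
--             if is_year(part):
--                 movie_info["year"] = part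
--                 found_year = True
--             else:
--                 name_parts.append(part)
--         else:
--             if is_resolution(part):
--                 movie_info["resolution"] = part
--             elif is_encoding(part):
--                 movie_info["encoding"] = part
--             elif part.startswith('[') and part.endswith(']'):
--                 movie_info["release_team"] = part[1:-1]
--
--     movie_info["name"] = " ".join(name_parts)
--     return movie_info
-- ===== SOURCE B (Python) =====
-- def is_resolution(part: str) -> bool:
--     """Check if string contains resolution marker."""
--     resolutions = ["1080p", "720p", "480p", "2160p", "4k", "uhd"]
--     clean_part = part.strip("[]()").lower()
--     return any(res.lower() in clean_part for res in resolutions)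
--
-- def is_year(part: str) -> bool:
--     """Check if string contains a year between 1900-2099."""
--     try:
--         clean_part = part.strip("[]()").lower()
--         year = int(''.join(c for c in clean_part if c.isdigit())[:4])
--         return 1900 <= year <= 2099
--     except:
--         return False
--
-- def is_encoding(part: str) -> bool:
--     """Check if string contains encoding information."""
--     encodings = ["h264", "x264", "x265", "h265", "aac2", "xvid"]
--     return any(encoding in part.lower() for encoding in encodings)
--
-- def parse_movie(filename: str) -> dict:
--     """Parse movie filename: split at the first year part, then resolve each
--     tail field by an independent backward first-match search (last-match-wins
--     per field, with the resolution > encoding > [team] priority per token)."""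
--     parts = filename.replace('.', ' ').split(' ')
--     idx = next((i for i, p in enumerate(parts) if is_year(p)), None)
--     if idx is None:
--         name, year, tail = ' '.join(parts), None, []
--     else:
--         name, year, tail = ' '.join(parts[:idx]), parts[idx], parts[idx + 1:]
--
--     def last(pred):
--         return next((p for p in reversed(tail) if pred(p)), None)
--
--     resolution = last(is_resolution)
--     encoding = last(lambda p: not is_resolution(p) and is_encoding(p))
--     team = last(lambda p: not is_resolution(p) and not is_encoding(p)
--                 and p.startswith('[') and p.endswith(']'))
--     return {"name": name, "year": year, "resolution": resolution,
--             "encoding": encoding,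
--             "release_team": team[1:-1] if team is not None else None}
-- ===== Notes on version B (the rewrite author's own statement) =====
-- stated objective: alternative
-- what changed: Replaces A's single stateful flag-loop that mutates a dict with staged passes: locate the first year part, join the prefix as the name, and compute resolution/encoding/release_team each by an independent backward first-match search over the tail (no classification fold at all), exploiting that last-match-wins per field equals first match from the right.
import Mathlib
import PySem

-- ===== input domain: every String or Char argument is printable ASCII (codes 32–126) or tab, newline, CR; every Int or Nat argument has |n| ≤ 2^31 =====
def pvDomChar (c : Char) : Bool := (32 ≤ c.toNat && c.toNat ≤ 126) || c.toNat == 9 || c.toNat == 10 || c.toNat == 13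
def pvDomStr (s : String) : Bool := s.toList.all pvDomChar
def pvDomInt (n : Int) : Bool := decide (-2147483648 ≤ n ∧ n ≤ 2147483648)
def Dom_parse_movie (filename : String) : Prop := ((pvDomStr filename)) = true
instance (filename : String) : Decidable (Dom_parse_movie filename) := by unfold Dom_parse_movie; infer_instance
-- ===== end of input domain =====

-- B replaces A's single stateful flag-loop by staged passes: find the first year part,
-- then fill each tail field by its own backward first-match search; objective: alternative.

-- ===== PORT A =====
-- helpers shared verbatim by A and B (B keeps them unchanged)
def is_resolution (part : String) : Bool :=
  let resolutions := ["1080p", "720p", "480p", "2160p", "4k", "uhd"]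
  let clean_part := PySem.Str.lower (PySem.Str.stripChars part "[]()")
  resolutions.any (fun res => PySem.Str.isIn (PySem.Str.lower res) clean_part)

def is_year (part : String) : Bool :=
  let clean_part := PySem.Str.lower (PySem.Str.stripChars part "[]()")
  -- int('') is the only exception the try can raise; ofChars? is none exactly there → except: return False
  match PySem.Int.ofChars? ((clean_part.toList.filter PySem.Chars.isdigit).take 4) with
  | some year => decide (1900 ≤ year ∧ year ≤ 2099)
  | none => false

def is_encoding (part : String) : Bool :=
  let encodings := ["h264", "x264", "x265", "h265", "aac2", "xvid"]
  encodings.any (fun enc => PySem.Str.isIn enc (PySem.Str.lower part))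

-- A's loop body over state (name_parts, found_year, year, resolution, encoding, release_team)
def stepA (s : List String × Bool × Option String × Option String × Option String × Option String)
    (part : String) : List String × Bool × Option String × Option String × Option String × Option String :=
  match s with
  | (np, found, y, r, e, t) =>
    if !found then
      if is_year part then (np, true, some part, r, e, t)
      else (np ++ [part], found, y, r, e, t)
    else
      if is_resolution part then (np, found, y, some part, e, t)
      else if is_encoding part then (np, found, y, r, some part, t)
      else if PySem.Str.startswith part "[" && PySem.Str.endswith part "]" then
        (np, found, y, r, e, some (PySem.Str.slice part (some 1) (some (-1))))
      else (np, found, y, r, e, t)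

def parse_movie (filename : String) : List (String × Option String) :=
  -- split(' '): separator is nonempty, so split? is never none
  let parts := (PySem.Str.split? (PySem.Str.replace filename "." " ") " ").getD []
  match List.foldl stepA ([], false, none, none, none, none) parts with
  | (np, _, y, r, e, t) =>
    [("name", some (PySem.Str.join " " np)), ("year", y),
     ("resolution", r), ("encoding", e), ("release_team", t)]

-- ===== PORT B =====
-- index of the first year part (next((i for i,p in enumerate(parts) if is_year(p)), None))
def findYearIdx : List String → Option Nat
  | [] => none
  | p :: ps => if is_year p then some 0 else (findYearIdx ps).map (· + 1)

-- last(pred): first match scanning the tail from the right (next(... reversed(tail) ...))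
def lastMatch (pred : String → Bool) (tail : List String) : Option String :=
  tail.reverse.find? pred

def parse_movie_alt (filename : String) : List (String × Option String) :=
  let parts := (PySem.Str.split? (PySem.Str.replace filename "." " ") " ").getD []
  let (name, year, tail) :=
    match findYearIdx parts with
    | none => (PySem.Str.join " " parts, (none : Option String), ([] : List String))
    | some i => (PySem.Str.join " " (parts.take i), some (parts.getD i ""), parts.drop (i + 1))
  let resolution := lastMatch is_resolution tail
  let encoding := lastMatch (fun p => !is_resolution p && is_encoding p) tail
  let team := lastMatch (fun p => !is_resolution p && !is_encoding p &&
      (PySem.Str.startswith p "[" && PySem.Str.endswith p "]")) tail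
  [("name", some name), ("year", year), ("resolution", resolution), ("encoding", encoding),
   ("release_team", team.map (fun s => PySem.Str.slice s (some 1) (some (-1))))]

-- ===== PRECONDITION & SPEC =====
def Spec_parse_movie (filename : String) (out : List (String × Option String)) : Prop := out = parse_movie_alt filename
instance (filename : String) (out : List (String × Option String)) : Decidable (Spec_parse_movie filename out) := by unfold Spec_parse_movie; infer_instance

-- ===== CLAIM (what is proved, stated in full; the proofs are below) =====
def Claim_equal_parse_movie : Prop := ∀ (filename : String), Dom_parse_movie filename → Spec_parse_movie filename (parse_movie filename)

-- ===== LEMMAS AND PROOFS =====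

-- after the year is found, A's fold computes exactly B's three backward first-match searches
lemma foldl_stepA_found (ps : List String) (np : List String) (y : Option String)
    (r e t : Option String) :
    List.foldl stepA (np, true, y, r, e, t) ps =
      (np, true, y,
       (lastMatch is_resolution ps).or r,
       (lastMatch (fun p => !is_resolution p && is_encoding p) ps).or e,
       ((lastMatch (fun p => !is_resolution p && !is_encoding p &&
           (PySem.Str.startswith p "[" && PySem.Str.endswith p "]")) ps).map
         (fun s => PySem.Str.slice s (some 1) (some (-1)))).or t) := by
  induction ps generalizing r e t with
  | nil => simp [lastMatch]
  | cons p ps ih =>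
    simp only [List.foldl, stepA, Bool.not_true, Bool.false_eq_true, if_false]
    have hrev : (p :: ps).reverse = ps.reverse ++ [p] := by simp
    by_cases hr : is_resolution p
    · simp [hr, ih, lastMatch, hrev, List.find?_append]
    · by_cases he : is_encoding p
      · simp [hr, he, ih, lastMatch, hrev, List.find?_append]
      · by_cases hb : (PySem.Chars.startswith p.toList ['['] && PySem.Chars.endswith p.toList [']']) = true
        · simp only [Bool.and_eq_true] at hb
          obtain ⟨h1, h2⟩ := hb
          simp [hr, he, h1, h2, ih, lastMatch, hrev, List.find?_append,
            PySem.Str.startswith, PySem.Str.endswith]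
        · simp only [Bool.and_eq_true] at hb
          simp [hr, he, hb, ih, lastMatch, hrev, List.find?_append,
            PySem.Str.startswith, PySem.Str.endswith]

-- no year part: the whole list is appended to name_parts, nothing else changes
lemma foldl_stepA_none (ps : List String) (np : List String)
    (h : findYearIdx ps = none) :
    List.foldl stepA (np, false, none, none, none, none) ps
      = (np ++ ps, false, none, none, none, none) := by
  induction ps generalizing np with
  | nil => simp
  | cons p ps ih =>
    by_cases hy : is_year p
    · simp [findYearIdx, hy] at h
    · simp only [findYearIdx, hy] at h
      simp only [Bool.false_eq_true, if_false, Option.map_eq_none_iff] at h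
      simp only [List.foldl, stepA, Bool.not_false, hy, Bool.false_eq_true, if_false, if_true, ih _ h]
      simp

-- first year at index i: name is the prefix, year that part, tail fields the backward searches
lemma foldl_stepA_some (ps : List String) (i : Nat) (np : List String)
    (h : findYearIdx ps = some i) :
    List.foldl stepA (np, false, none, none, none, none) ps
      = (np ++ ps.take i, true, some (ps.getD i ""),
         lastMatch is_resolution (ps.drop (i + 1)),
         lastMatch (fun p => !is_resolution p && is_encoding p) (ps.drop (i + 1)),
         (lastMatch (fun p => !is_resolution p && !is_encoding p &&
             (PySem.Str.startswith p "[" && PySem.Str.endswith p "]")) (ps.drop (i + 1))).map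
           (fun s => PySem.Str.slice s (some 1) (some (-1)))) := by
  induction ps generalizing np i with
  | nil => simp [findYearIdx] at h
  | cons p ps ih =>
    by_cases hy : is_year p
    · simp [findYearIdx, hy] at h
      subst h
      simp only [List.foldl, stepA, Bool.not_false, if_true, hy, foldl_stepA_found]
      simp
    · simp only [findYearIdx, hy, Bool.false_eq_true, if_false, Option.map_eq_some_iff] at h
      obtain ⟨j, hj, rfl⟩ := h
      simp only [List.foldl, stepA, Bool.not_false, hy, Bool.false_eq_true, if_false, if_true, ih _ _ hj]
      simp

-- ===== VERDICT (by name: the statement is the Claim_ definition above) =====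
theorem parse_movie_spec : Claim_equal_parse_movie := by
  intro filename _
  unfold Spec_parse_movie parse_movie parse_movie_alt
  simp only []
  generalize (PySem.Str.split? (PySem.Str.replace filename "." " ") " ").getD [] = parts
  cases h : findYearIdx parts with
  | none => rw [foldl_stepA_none parts [] h]; simp [lastMatch]
  | some i => rw [foldl_stepA_some parts i [] h]; simp
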